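-- pv_equiv track=rewrite | github.com/EdsonEddy/perfilTesis2 | workspace_thesis/dataset/py-tests/1497/148829.py | ascii_to_bin
-- ===== SOURCE A (Python) =====
-- def ascii_to_bin(char):
--     ascii = ord(char)
--     bin = []
--     while (ascii > 0):
--         if (ascii & 1) == 1:
--             bin.append("1")
--         else:
--             bin.append("0")
--         ascii = ascii >> 1
--     bin.reverse()
--     bin = "".join(bin)
--     zerofix = (8 - len(bin)) * '0'
--     return zerofix + bin
-- ===== SOURCE B (Python) =====
-- def ascii_to_bin(char):
--     return format(ord(char), '08b')
-- ===== Notes on version B (the rewrite author's own statement) =====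
-- stated objective: idiomatic
-- what changed: replaces the manual LSB-first shift-and-mask loop with list append, reverse, join and zero-pad by a single closed-form format(ord(char), '08b') call
import Mathlib
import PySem

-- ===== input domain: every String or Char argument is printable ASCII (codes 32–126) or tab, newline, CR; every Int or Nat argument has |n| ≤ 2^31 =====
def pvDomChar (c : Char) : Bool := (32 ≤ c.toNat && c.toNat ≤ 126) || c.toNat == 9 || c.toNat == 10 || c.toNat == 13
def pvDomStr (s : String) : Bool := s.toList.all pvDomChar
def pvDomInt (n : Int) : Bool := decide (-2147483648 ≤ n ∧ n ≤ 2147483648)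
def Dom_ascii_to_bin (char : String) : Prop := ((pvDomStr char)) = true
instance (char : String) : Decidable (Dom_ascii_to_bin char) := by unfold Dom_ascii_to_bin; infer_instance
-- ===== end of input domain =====

-- B replaces A's manual shift-and-mask loop / reverse / join / zero-pad with one format(ord(char), '08b') call (idiomatic, same cost).

-- ===== PORT A =====
-- ord(char): defined for length-1 strings only; Pre_ excludes other strings (ord raises TypeError there).
def pvOrd (char : String) : Nat :=
  match char.toList with
  | [c] => c.toNat
  | _ => 0

-- the while loop: appends "1"/"0" (one char each, kept as Char) for each bit, LSB first.
-- 'ascii & 1' ported as % 2, 'ascii >> 1' as / 2 (exact on Nat).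
def aLoop (ascii : Nat) (bin : List Char) : List Char :=
  if ascii > 0 then
    aLoop (ascii / 2) (bin ++ [if ascii % 2 = 1 then '1' else '0'])
  else bin
termination_by ascii
decreasing_by exact Nat.div_lt_self (by omega) (by omega)

def ascii_to_bin (char : String) : String :=
  let ascii := pvOrd char
  let bin := (aLoop ascii []).reverse
  let zerofix := List.replicate (8 - bin.length) '0'  -- (8 - len)*'0'; Nat '-' gives '' when len ≥ 8, as in Python
  String.mk (zerofix ++ bin)

-- ===== PORT B =====
-- format(n, 'b'): binary digits MSB-first, '0' for n = 0
def binDigits (n : Nat) : List Char :=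
  if n = 0 then []
  else binDigits (n / 2) ++ [if n % 2 = 1 then '1' else '0']
termination_by n
decreasing_by exact Nat.div_lt_self (by omega) (by omega)

-- format(n, '08b'): minimum width 8, left-padded with '0'
def fmt08b (n : Nat) : List Char :=
  let body := if n = 0 then ['0'] else binDigits n
  List.replicate (8 - body.length) '0' ++ body

def ascii_to_bin_alt (char : String) : String :=
  String.mk (fmt08b (pvOrd char))

-- ===== PRECONDITION & SPEC =====
-- exactly the strings ord accepts; on any other string Python's ord (hence A) raises TypeError
def Pre_ascii_to_bin (char : String) : Prop := char.toList.length = 1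
instance (char : String) : Decidable (Pre_ascii_to_bin char) := by unfold Pre_ascii_to_bin; infer_instance
def pvWitness_ascii_to_bin : String := "~"

def Spec_ascii_to_bin (char : String) (out : String) : Prop := out = ascii_to_bin_alt char
instance (char : String) (out : String) : Decidable (Spec_ascii_to_bin char out) := by unfold Spec_ascii_to_bin; infer_instance

-- ===== CLAIM (what is proved, stated in full; the proofs are below) =====
def Claim_equal_ascii_to_bin : Prop := ∀ (char : String), Dom_ascii_to_bin char → Pre_ascii_to_bin char → Spec_ascii_to_bin char (ascii_to_bin char)

-- ===== LEMMAS AND PROOFS =====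

-- the LSB-first list the loop produces
def lsbs (n : Nat) : List Char :=
  if n = 0 then []
  else (if n % 2 = 1 then '1' else '0') :: lsbs (n / 2)
termination_by n
decreasing_by exact Nat.div_lt_self (by omega) (by omega)

theorem aLoop_eq (n : Nat) : ∀ l, aLoop n l = l ++ lsbs n := by
  induction n using Nat.strong_induction_on with
  | _ n ih =>
    intro l
    rw [aLoop, lsbs]
    by_cases h : n = 0
    · simp [h]
    · have hp : n > 0 := Nat.pos_of_ne_zero h
      simp only [hp, if_pos, h, ih (n / 2) (Nat.div_lt_self hp (by omega))]
      simp

theorem lsbs_reverse (n : Nat) : (lsbs n).reverse = binDigits n := by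
  induction n using Nat.strong_induction_on with
  | _ n ih =>
    rw [lsbs, binDigits]
    by_cases h : n = 0
    · simp [h]
    · simp [h, ih (n / 2) (Nat.div_lt_self (Nat.pos_of_ne_zero h) (by omega))]

theorem ports_agree (char : String) : ascii_to_bin char = ascii_to_bin_alt char := by
  unfold ascii_to_bin ascii_to_bin_alt fmt08b
  simp only [aLoop_eq, List.nil_append, lsbs_reverse]
  by_cases h : pvOrd char = 0
  · rw [h]
    refine congrArg String.mk ?_
    simp [binDigits]
  · simp [h]

-- ===== VERDICT (by name: the statement is the Claim_ definition above) =====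
theorem ascii_to_bin_spec : Claim_equal_ascii_to_bin := by
  intro char _ _
  unfold Spec_ascii_to_bin
  exact ports_agree char
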